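-- pv_equiv track=rewrite | github.com/Arskan17/Efficient-algorithms-for-checking-equivalence-of-compressed-strings | testing_algorithms/unary_string_base_3.py | get_final_rule
-- ===== SOURCE A (Python) =====
-- def get_final_rule(input_string: list, non_terminal: str, replacement_character_id: int) -> tuple:
--     sub_rules = {}
--     result = []
--     i = 0
--
--     while i < len(input_string):
--         if i < len(input_string)-1:
--             replacement_character = f"{non_terminal}{replacement_character_id}"
--             replacement_character_id += 1
--
--             result.append(replacement_character)
--             sub_rules[replacement_character] = (input_string[i], input_string[i+1])
--             i += 2
--         else:
--             result.append(input_string[i])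
--             i += 1
--
--     return result, sub_rules, replacement_character_id
-- ===== SOURCE B (Python) =====
-- def get_final_rule(input_string: list, non_terminal: str, replacement_character_id: int) -> tuple:
--     n2 = len(input_string) // 2
--     result = [f"{non_terminal}{replacement_character_id + k}" for k in range(n2)]
--     sub_rules = {f"{non_terminal}{replacement_character_id + k}":
--                  (input_string[2 * k], input_string[2 * k + 1]) for k in range(n2)}
--     if len(input_string) % 2 == 1:
--         result = result + [input_string[-1]]
--     return result, sub_rules, replacement_character_id + n2
-- ===== Notes on version B (the rewrite author's own statement) =====
-- stated objective: idiomatic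
-- what changed: Replaces A's stateful while-loop (index stepping by 2, mutable id counter, growing accumulators) with closed-form comprehensions over range(len//2) that compute each key as id+k, a dict comprehension for the sub-rules, a separate odd-leftover append, and a returned id computed as id + len//2.
import Mathlib
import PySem

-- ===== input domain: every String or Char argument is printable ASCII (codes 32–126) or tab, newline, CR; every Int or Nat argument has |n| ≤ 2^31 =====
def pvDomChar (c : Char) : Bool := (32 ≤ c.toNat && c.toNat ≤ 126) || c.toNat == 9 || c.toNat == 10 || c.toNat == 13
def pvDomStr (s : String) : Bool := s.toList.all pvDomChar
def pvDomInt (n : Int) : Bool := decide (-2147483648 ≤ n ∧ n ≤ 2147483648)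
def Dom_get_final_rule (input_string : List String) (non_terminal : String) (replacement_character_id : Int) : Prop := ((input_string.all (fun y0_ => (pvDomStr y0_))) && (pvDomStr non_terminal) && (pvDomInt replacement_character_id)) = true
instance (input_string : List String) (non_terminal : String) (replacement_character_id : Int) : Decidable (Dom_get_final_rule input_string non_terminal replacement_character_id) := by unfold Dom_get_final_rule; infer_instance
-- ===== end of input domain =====

-- B replaces A's stateful while-loop (index stepping by 2, mutable id counter, growing accumulators)
-- by closed-form comprehensions over range(len//2) plus a separate odd-leftover step; objective: idiomatic, no speedup claimed.

-- ===== PORT A =====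
-- A's while loop: each iteration consumes two elements (i < len-1) or the single last one.
def gfrA_loop (nt : String) : List String → Int → List String → PySem.Dict String (String × String) → List String × PySem.Dict String (String × String) × Int
  | [], id, res, d => (res, d, id)
  | [x], id, res, d => (res ++ [x], d, id)
  | x :: y :: rest, id, res, d =>
      let rc := nt ++ PySem.Int.toStr id
      gfrA_loop nt rest (id + 1) (res ++ [rc]) (d.insert rc (x, y))

def get_final_rule (input_string : List String) (non_terminal : String) (replacement_character_id : Int) : List String × (List (String × String × String)) × Int :=
  let out := gfrA_loop non_terminal input_string replacement_character_id [] PySem.Dict.empty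
  (out.1, out.2.1.items, out.2.2)

-- ===== PORT B =====
def get_final_rule_alt (input_string : List String) (non_terminal : String) (replacement_character_id : Int) : List String × (List (String × String × String)) × Int :=
  let n2 : Int := PySem.Int.floordiv (input_string.length : Int) 2
  let result := (PySem.List.pyRange 0 n2 1).map (fun k => non_terminal ++ PySem.Int.toStr (replacement_character_id + k))
  let sub_rules := (PySem.List.pyRange 0 n2 1).foldl
      (fun d k => d.insert (non_terminal ++ PySem.Int.toStr (replacement_character_id + k))
                           (PySem.List.pyGetD input_string (2 * k) "", PySem.List.pyGetD input_string (2 * k + 1) ""))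
      PySem.Dict.empty
  let result2 := if PySem.Int.mod (input_string.length : Int) 2 == 1 then result ++ [PySem.List.pyGetD input_string (-1) ""] else result
  (result2, sub_rules.items, replacement_character_id + n2)

-- ===== PRECONDITION & SPEC =====
def Spec_get_final_rule (input_string : List String) (non_terminal : String) (replacement_character_id : Int) (out : List String × (List (String × String × String)) × Int) : Prop := out = get_final_rule_alt input_string non_terminal replacement_character_id
instance (input_string : List String) (non_terminal : String) (replacement_character_id : Int) (out : List String × (List (String × String × String)) × Int) : Decidable (Spec_get_final_rule input_string non_terminal replacement_character_id out) := by unfold Spec_get_final_rule; infer_instance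

-- ===== CLAIM (what is proved, stated in full; the proofs are below) =====
def Claim_equal_get_final_rule : Prop := ∀ (input_string : List String) (non_terminal : String) (replacement_character_id : Int), Dom_get_final_rule input_string non_terminal replacement_character_id → Spec_get_final_rule input_string non_terminal replacement_character_id (get_final_rule input_string non_terminal replacement_character_id)

-- ===== LEMMAS AND PROOFS =====
def keyF (nt : String) (id : Int) (k : Nat) : String := nt ++ PySem.Int.toStr (id + k)

def pairsD (nt : String) (id : Int) (xs : List String) (d : PySem.Dict String (String × String)) : PySem.Dict String (String × String) :=
  (List.range (xs.length / 2)).foldl (fun d' k => d'.insert (keyF nt id k) (xs.getD (2 * k) "", xs.getD (2 * k + 1) "")) d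

theorem keyF_succ (nt : String) (id : Int) (k : Nat) : keyF nt id (k + 1) = keyF nt (id + 1) k := by
  unfold keyF
  have e : id + ((k + 1 : Nat) : Int) = (id + 1) + (k : Nat) := by push_cast; ring
  rw [e]

theorem keyF_zero (nt : String) (id : Int) : keyF nt id 0 = nt ++ PySem.Int.toStr id := by
  simp [keyF]

theorem pairsD_cons (nt : String) (id : Int) (x y : String) (rest : List String) (d : PySem.Dict String (String × String)) :
    pairsD nt id (x :: y :: rest) d = pairsD nt (id + 1) rest (d.insert (nt ++ PySem.Int.toStr id) (x, y)) := by
  unfold pairsD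
  have hlen : (x :: y :: rest).length / 2 = rest.length / 2 + 1 := by simp; omega
  rw [hlen, List.range_succ_eq_map, List.foldl_cons, List.foldl_map]
  have hinit : d.insert (keyF nt id 0) ((x :: y :: rest).getD (2 * 0) "", (x :: y :: rest).getD (2 * 0 + 1) "") = d.insert (nt ++ PySem.Int.toStr id) (x, y) := by
    rw [keyF_zero]
    norm_num
  rw [hinit]
  refine (PySem.List.foldl_congr_mem _ _ _ _ ?_).symm
  intro acc k _
  rw [keyF_succ]
  have e1 : 2 * (k + 1) = 2 * k + 1 + 1 := by omega
  rw [e1]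
  simp

theorem loopA_eq (nt : String) : ∀ (xs : List String) (id : Int) (res : List String) (d : PySem.Dict String (String × String)),
    gfrA_loop nt xs id res d =
      ( (res ++ (List.range (xs.length / 2)).map (keyF nt id))
          ++ (if xs.length % 2 = 1 then [xs.getLast?.getD ""] else []),
        pairsD nt id xs d,
        id + (xs.length / 2 : Nat) )
  | [], id, res, d => by simp [gfrA_loop, pairsD]
  | [x], id, res, d => by simp [gfrA_loop, pairsD]
  | x :: y :: rest, id, res, d => by
      have ih := loopA_eq nt rest (id + 1) (res ++ [nt ++ PySem.Int.toStr id]) (d.insert (nt ++ PySem.Int.toStr id) (x, y))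
      have hlen : (x :: y :: rest).length / 2 = rest.length / 2 + 1 := by simp; omega
      have hmod : (x :: y :: rest).length % 2 = rest.length % 2 := by simp; omega
      have hsh : (keyF nt id ∘ fun k => k + 1) = keyF nt (id + 1) := by
        funext k; simp [Function.comp, keyF_succ]
      rw [gfrA_loop, ih]
      refine Prod.ext ?_ (Prod.ext ?_ ?_)
      · -- result lists
        dsimp only
        simp only [hlen, hmod, List.range_succ_eq_map, List.map_cons, List.map_map, hsh, keyF_zero]
        by_cases h1 : rest.length % 2 = 1
        · rcases rest with _ | ⟨r, t⟩
          · simp at h1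
          · simp
        · simp [h1]
      · -- dicts
        dsimp only
        rw [pairsD_cons]
      · -- returned id
        dsimp only
        rw [hlen]
        push_cast
        ring

theorem altB_eq (xs : List String) (nt : String) (id : Int) :
    get_final_rule_alt xs nt id =
      ( ((List.range (xs.length / 2)).map (keyF nt id))
          ++ (if xs.length % 2 = 1 then [xs.getLast?.getD ""] else []),
        (pairsD nt id xs PySem.Dict.empty).items,
        id + (xs.length / 2 : Nat) ) := by
  have hdiv : PySem.Int.floordiv (xs.length : Int) 2 = ((xs.length / 2 : Nat) : Int) := by
    exact_mod_cast PySem.Int.floordiv_natCast xs.length 2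
  have hmod : PySem.Int.mod (xs.length : Int) 2 = ((xs.length % 2 : Nat) : Int) := by
    exact_mod_cast PySem.Int.mod_natCast xs.length 2
  have hrange : PySem.List.pyRange 0 ((xs.length / 2 : Nat) : Int) 1
      = (List.range (xs.length / 2)).map (fun k : Nat => (k : Int)) := by
    rw [PySem.List.pyRange_one]
    have e : (((xs.length / 2 : Nat) : Int) - 0).toNat = xs.length / 2 := by omega
    rw [e]
    simp
  simp only [get_final_rule_alt, hdiv, hmod, hrange, List.map_map, List.foldl_map]
  have hmapc : (List.range (xs.length / 2)).map
      ((fun k : Int => nt ++ PySem.Int.toStr (id + k)) ∘ fun k : Nat => (k : Int))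
      = (List.range (xs.length / 2)).map (keyF nt id) := by
    apply List.map_congr_left
    intro k _
    simp [keyF]
  have hfold : (List.range (xs.length / 2)).foldl
      (fun d (k : Nat) => d.insert (nt ++ PySem.Int.toStr (id + ((k : Int))))
        (PySem.List.pyGetD xs (2 * (k : Int)) "", PySem.List.pyGetD xs (2 * (k : Int) + 1) ""))
      PySem.Dict.empty = pairsD nt id xs PySem.Dict.empty := by
    unfold pairsD
    apply PySem.List.foldl_congr_mem
    intro d' k _
    have e1 : (2 : Int) * (k : Nat) = ((2 * k : Nat) : Int) := by push_cast; ring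
    have e2 : ((2 * k : Nat) : Int) + 1 = ((2 * k + 1 : Nat) : Int) := by push_cast; ring
    rw [e1, e2, PySem.List.pyGetD_natCast, PySem.List.pyGetD_natCast]
    simp [keyF]
  refine Prod.ext ?_ (Prod.ext ?_ ?_)
  · -- result component
    dsimp only
    by_cases h : xs.length % 2 = 1
    · have hne : xs ≠ [] := by intro he; rw [he] at h; simp at h
      have hc : (((xs.length % 2 : Nat) : Int) == 1) = true := by simp [h]
      rw [if_pos hc, hmapc, if_pos h]
      have hlast : PySem.List.pyGetD xs (-1) "" = xs.getLast hne := PySem.List.pyGetD_neg_one xs "" hne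
      rw [hlast]
      simp [List.getLast?_eq_some_getLast hne]
    · have hcp : ¬ ((((xs.length % 2 : Nat) : Int) == 1) = true) := by simp; omega
      rw [if_neg hcp, hmapc, if_neg h]
      simp
  · -- dict component
    dsimp only
    rw [hfold]
  · dsimp only

-- ===== VERDICT (by name: the statement is the Claim_ definition above) =====
theorem get_final_rule_spec : Claim_equal_get_final_rule := by
  intro xs nt id _
  unfold Spec_get_final_rule get_final_rule
  rw [loopA_eq, altB_eq]
  simp
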